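-- pv_equiv track=rewrite | github.com/yharby/geoparquet-io | geoparquet_io/core/wfs.py | _detect_best_output_format
-- ===== SOURCE A (Python) =====
-- GEOJSON_FORMATS = [
--     "application/json",
--     "json",
--     "geojson",
--     "application/geo+json",
--     "application/vnd.geo+json",
-- ]
--
-- GML_FORMATS = [
--     "gml3",
--     "text/xml; subtype=gml/3.1.1",
--     "application/gml+xml; version=3.1",
--     "gml32",
--     "text/xml; subtype=gml/3.2",
--     "gml2",
--     "text/xml; subtype=gml/2.1.2",
-- ]
--
-- def _detect_best_output_format(available_formats: list[str]) -> str: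
--     """
--     Detect the best output format from available formats.
--
--     Prefers GeoJSON for faster parsing, falls back to GML.
--
--     Args:
--         available_formats: List of format strings from capabilities
--
--     Returns:
--         Best format string to request
--     """
--     available_lower = [f.lower() for f in available_formats]
--
--     # Check for GeoJSON formats (preferred - faster to parse)
--     for fmt in GEOJSON_FORMATS:
--         if fmt.lower() in available_lower:
--             idx = available_lower.index(fmt.lower())
--             return available_formats[idx]
--
--     # Check for GML formats
--     for fmt in GML_FORMATS:
--         if fmt.lower() in available_lower:
--             idx = available_lower.index(fmt.lower())
--             return available_formats[idx]
--
--     # Fallback to first available or default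
--     return available_formats[0] if available_formats else "GML3"
-- ===== SOURCE B (Python) =====
-- GEOJSON_FORMATS = [
--     "application/json",
--     "json",
--     "geojson",
--     "application/geo+json",
--     "application/vnd.geo+json",
-- ]
--
-- GML_FORMATS = [
--     "gml3",
--     "text/xml; subtype=gml/3.1.1",
--     "application/gml+xml; version=3.1",
--     "gml32",
--     "text/xml; subtype=gml/3.2",
--     "gml2",
--     "text/xml; subtype=gml/2.1.2",
-- ]
--
-- # Preference rank of each recognised format string (lower rank = more preferred).
-- _FORMAT_RANK = {fmt.lower(): rank for rank, fmt in enumerate(GEOJSON_FORMATS + GML_FORMATS)}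
--
--
-- def _detect_best_output_format(available_formats: list[str]) -> str:
--     """Pick the most preferred available format in one pass over the input."""
--     miss = len(_FORMAT_RANK)
--     return min(available_formats,
--                key=lambda f: _FORMAT_RANK.get(f.lower(), miss),
--                default="GML3")
-- ===== Notes on version B (the rewrite author's own statement) =====
-- stated objective: simpler
-- what changed: A scans the two preference lists, testing membership and calling .index on the lowercased input for each preferred format; B precomputes a rank dict from GEOJSON_FORMATS+GML_FORMATS once and picks the answer with a single min() pass over the input keyed by that rank (default rank = table size, default element = 'GML3').
import Mathlib
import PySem

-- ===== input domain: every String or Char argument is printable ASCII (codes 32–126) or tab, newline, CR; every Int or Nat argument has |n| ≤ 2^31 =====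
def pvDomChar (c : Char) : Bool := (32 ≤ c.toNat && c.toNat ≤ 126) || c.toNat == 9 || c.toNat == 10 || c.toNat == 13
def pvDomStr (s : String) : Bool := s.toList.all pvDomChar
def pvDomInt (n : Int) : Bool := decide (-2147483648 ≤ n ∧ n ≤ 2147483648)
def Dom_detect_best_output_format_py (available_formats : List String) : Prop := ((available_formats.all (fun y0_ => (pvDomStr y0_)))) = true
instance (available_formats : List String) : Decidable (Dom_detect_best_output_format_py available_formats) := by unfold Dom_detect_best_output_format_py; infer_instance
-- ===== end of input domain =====

-- B replaces A's repeated scans over the two preference lists by a precomputed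
-- rank table and a single min-by-rank pass over the input (objective: simpler).

-- ===== PORT A =====
def pvGeojsonFormats : List String :=
  ["application/json", "json", "geojson", "application/geo+json", "application/vnd.geo+json"]

def pvGmlFormats : List String :=
  ["gml3", "text/xml; subtype=gml/3.1.1", "application/gml+xml; version=3.1",
   "gml32", "text/xml; subtype=gml/3.2", "gml2", "text/xml; subtype=gml/2.1.2"]

-- one of A's preference loops:
-- 'for fmt in prefs: if fmt.lower() in available_lower: return available_formats[available_lower.index(fmt.lower())]'
def pvScanPrefs (prefs : List String) (availLower : List String) (avail : List String) : Option String :=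
  match prefs with
  | [] => none
  | fmt :: rest =>
    if PySem.Str.lower fmt ∈ availLower then
      (PySem.List.index? availLower (PySem.Str.lower fmt)).bind
        (fun idx => PySem.List.pyGet? avail (idx : Int))
    else pvScanPrefs rest availLower avail

def detect_best_output_format_py (available_formats : List String) : String :=
  let availLower := available_formats.map PySem.Str.lower
  match pvScanPrefs pvGeojsonFormats availLower available_formats with
  | some s => s
  | none =>
    match pvScanPrefs pvGmlFormats availLower available_formats with
    | some s => s
    | none =>
      match available_formats with
      | [] => "GML3"
      | x :: _ => x

-- ===== PORT B =====
-- _FORMAT_RANK = {fmt.lower(): rank for rank, fmt in enumerate(GEOJSON_FORMATS + GML_FORMATS)}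
def pvFormatRank : PySem.Dict String Int :=
  (PySem.List.enumerate (pvGeojsonFormats ++ pvGmlFormats) 0).foldl
    (fun d p => PySem.Dict.insert d (PySem.Str.lower p.2) p.1) PySem.Dict.empty

-- min(available_formats, key=lambda f: _FORMAT_RANK.get(f.lower(), miss), default="GML3")
def detect_best_output_format_py_alt (available_formats : List String) : String :=
  PySem.List.minD available_formats
    (fun f => PySem.Dict.getD pvFormatRank (PySem.Str.lower f) (pvFormatRank.size : Int))
    "GML3"

-- ===== PRECONDITION & SPEC =====
def Spec_detect_best_output_format_py (available_formats : List String) (out : String) : Prop := out = detect_best_output_format_py_alt available_formats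
instance (available_formats : List String) (out : String) : Decidable (Spec_detect_best_output_format_py available_formats out) := by unfold Spec_detect_best_output_format_py; infer_instance

-- ===== CLAIM (what is proved, stated in full; the proofs are below) =====
def Claim_equal_detect_best_output_format_py : Prop := ∀ (available_formats : List String), Dom_detect_best_output_format_py available_formats → Spec_detect_best_output_format_py available_formats (detect_best_output_format_py available_formats)

-- ===== LEMMAS AND PROOFS =====

-- the concatenated preference list
def pvP : List String := pvGeojsonFormats ++ pvGmlFormats

-- closed-form rank of a (already lowercased) string: its position in pvP, 12 if absent
def pvRankOf (s : String) : Nat :=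
  if "application/json" = s then 0
  else if "json" = s then 1
  else if "geojson" = s then 2
  else if "application/geo+json" = s then 3
  else if "application/vnd.geo+json" = s then 4
  else if "gml3" = s then 5
  else if "text/xml; subtype=gml/3.1.1" = s then 6
  else if "application/gml+xml; version=3.1" = s then 7
  else if "gml32" = s then 8
  else if "text/xml; subtype=gml/3.2" = s then 9
  else if "gml2" = s then 10
  else if "text/xml; subtype=gml/2.1.2" = s then 11
  else 12

def pvK (x : String) : Nat := pvRankOf (PySem.Str.lower x)

-- m is the first element of a attaining the minimal pvK-rank
def pvIsFirstMin (a : List String) (m : String) : Prop :=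
  ∃ i : Nat, i < a.length ∧ a.getD i "" = m ∧
    (∀ j, j < i → pvK m < pvK (a.getD j "")) ∧
    (∀ j, j < a.length → pvK m ≤ pvK (a.getD j ""))

set_option maxHeartbeats 2000000 in
lemma pvRank_getD_eq (s : String) :
    PySem.Dict.getD pvFormatRank s (pvFormatRank.size : Int) = (pvRankOf s : Nat) := by
  by_cases h1 : s = "application/json"; · subst h1; decide
  by_cases h2 : s = "json"; · subst h2; decide
  by_cases h3 : s = "geojson"; · subst h3; decide
  by_cases h4 : s = "application/geo+json"; · subst h4; decide
  by_cases h5 : s = "application/vnd.geo+json"; · subst h5; decide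
  by_cases h6 : s = "gml3"; · subst h6; decide
  by_cases h7 : s = "text/xml; subtype=gml/3.1.1"; · subst h7; decide
  by_cases h8 : s = "application/gml+xml; version=3.1"; · subst h8; decide
  by_cases h9 : s = "gml32"; · subst h9; decide
  by_cases h10 : s = "text/xml; subtype=gml/3.2"; · subst h10; decide
  by_cases h11 : s = "gml2"; · subst h11; decide
  by_cases h12 : s = "text/xml; subtype=gml/2.1.2"; · subst h12; decide
  have hlit : pvFormatRank = PySem.Dict.mk
      [("application/json",0),("json",1),("geojson",2),("application/geo+json",3),
       ("application/vnd.geo+json",4),("gml3",5),("text/xml; subtype=gml/3.1.1",6),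
       ("application/gml+xml; version=3.1",7),("gml32",8),("text/xml; subtype=gml/3.2",9),
       ("gml2",10),("text/xml; subtype=gml/2.1.2",11)] := by decide
  rw [hlit]
  unfold pvRankOf
  simp only [PySem.Dict.getD, PySem.Dict.get?_mk_cons, beq_iff_eq,
    if_neg (Ne.symm h1), if_neg (Ne.symm h2), if_neg (Ne.symm h3), if_neg (Ne.symm h4),
    if_neg (Ne.symm h5), if_neg (Ne.symm h6), if_neg (Ne.symm h7), if_neg (Ne.symm h8),
    if_neg (Ne.symm h9), if_neg (Ne.symm h10), if_neg (Ne.symm h11), if_neg (Ne.symm h12)]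
  simp [PySem.Dict.get?, PySem.Dict.size]

set_option maxHeartbeats 2000000 in
lemma pvRankOf_eq_iff (s : String) (n : Nat) (h : n < 12) :
    pvRankOf s = n ↔ s = pvP.getD n "" := by
  by_cases h1 : s = "application/json"; · subst h1; interval_cases n <;> decide
  by_cases h2 : s = "json"; · subst h2; interval_cases n <;> decide
  by_cases h3 : s = "geojson"; · subst h3; interval_cases n <;> decide
  by_cases h4 : s = "application/geo+json"; · subst h4; interval_cases n <;> decide
  by_cases h5 : s = "application/vnd.geo+json"; · subst h5; interval_cases n <;> decide
  by_cases h6 : s = "gml3"; · subst h6; interval_cases n <;> decide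
  by_cases h7 : s = "text/xml; subtype=gml/3.1.1"; · subst h7; interval_cases n <;> decide
  by_cases h8 : s = "application/gml+xml; version=3.1"; · subst h8; interval_cases n <;> decide
  by_cases h9 : s = "gml32"; · subst h9; interval_cases n <;> decide
  by_cases h10 : s = "text/xml; subtype=gml/3.2"; · subst h10; interval_cases n <;> decide
  by_cases h11 : s = "gml2"; · subst h11; interval_cases n <;> decide
  by_cases h12 : s = "text/xml; subtype=gml/2.1.2"; · subst h12; interval_cases n <;> decide
  have h0 : pvRankOf s = 12 := by
    unfold pvRankOf
    simp only [if_neg (Ne.symm h1), if_neg (Ne.symm h2), if_neg (Ne.symm h3), if_neg (Ne.symm h4),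
      if_neg (Ne.symm h5), if_neg (Ne.symm h6), if_neg (Ne.symm h7), if_neg (Ne.symm h8),
      if_neg (Ne.symm h9), if_neg (Ne.symm h10), if_neg (Ne.symm h11), if_neg (Ne.symm h12)]
  rw [h0]
  interval_cases n <;> simp_all [pvP, pvGeojsonFormats, pvGmlFormats]

set_option maxHeartbeats 1000000 in
lemma pvRankOf_le (s : String) : pvRankOf s ≤ 12 := by
  unfold pvRankOf; split_ifs <;> omega

lemma pvK_le (x : String) : pvK x ≤ 12 := pvRankOf_le _

lemma pvLower_mem_P : ∀ p ∈ pvP, PySem.Str.lower p = p := by decide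

lemma pvFirstMin_unique {a : List String} {m₁ m₂ : String}
    (h₁ : pvIsFirstMin a m₁) (h₂ : pvIsFirstMin a m₂) : m₁ = m₂ := by
  obtain ⟨i₁, hl₁, he₁, hf₁, ha₁⟩ := h₁
  obtain ⟨i₂, hl₂, he₂, hf₂, ha₂⟩ := h₂
  rcases lt_trichotomy i₁ i₂ with h | h | h
  · exfalso
    have hx := hf₂ i₁ h
    rw [he₁] at hx
    have hy := ha₁ i₂ hl₂
    rw [he₂] at hy
    omega
  · rw [← he₁, ← he₂, h]
  · exfalso
    have hx := hf₁ i₂ h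
    rw [he₂] at hx
    have hy := ha₂ i₁ hl₁
    rw [he₁] at hy
    omega

lemma pvGetD_mem {a : List String} {j : Nat} (h : j < a.length) : a.getD j "" ∈ a := by
  rw [List.getD_eq_getElem _ _ h]
  exact List.getElem_mem h

lemma pvGetD_map_lower {a : List String} {j : Nat} (h : j < a.length) :
    (a.map PySem.Str.lower).getD j "" = PySem.Str.lower (a.getD j "") := by
  rw [List.getD_eq_getElem _ _ (by simpa), List.getD_eq_getElem _ _ h, List.getElem_map]

-- what the body of A's loop computes once 'fmt.lower() in available_lower' holds
lemma pvScan_find (a : List String) (fl : String) (h : fl ∈ a.map PySem.Str.lower) :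
    ∃ i : Nat, i < a.length ∧
      ((PySem.List.index? (a.map PySem.Str.lower) fl).bind
        (fun idx => PySem.List.pyGet? a (idx : Int))) = some (a.getD i "") ∧
      (a.map PySem.Str.lower).getD i "" = fl ∧
      (∀ j, j < i → (a.map PySem.Str.lower).getD j "" ≠ fl) := by
  cases hidx : List.idxOf? fl (a.map PySem.Str.lower) with
  | none => exact absurd h (List.idxOf?_eq_none_iff.mp hidx)
  | some i =>
    obtain ⟨hi, hget, hpre⟩ := List.idxOf?_eq_some_iff.mp hidx
    have hia : i < a.length := by simpa using hi
    refine ⟨i, hia, ?_, ?_, ?_⟩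
    · simp only [PySem.List.index?, hidx, Option.bind_some, PySem.List.pyGet?_natCast]
      rw [List.getElem?_eq_getElem hia, List.getD_eq_getElem _ _ hia]
    · rw [List.getD_eq_getElem _ _ hi, hget]
    · intro j hj hc
      have hjl : j < (a.map PySem.Str.lower).length := by omega
      exact hpre j hj (by rw [← List.getD_eq_getElem _ _ hjl]; exact hc)

lemma pvScan_append (p₁ p₂ a : List String) :
    pvScanPrefs (p₁ ++ p₂) (a.map PySem.Str.lower) a =
      match pvScanPrefs p₁ (a.map PySem.Str.lower) a with
      | some s => some s
      | none => pvScanPrefs p₂ (a.map PySem.Str.lower) a := by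
  induction p₁ with
  | nil => simp [pvScanPrefs]
  | cons fmt rest ih =>
    simp only [List.cons_append, pvScanPrefs]
    split_ifs with h
    · obtain ⟨i, _, hbind, _, _⟩ := pvScan_find a (PySem.Str.lower fmt) h
      rw [hbind]
    · exact ih

lemma pvScan_spec (prefs : List String) (n : Nat) (hsuf : pvP.drop n = prefs)
    (a : List String) (hlow : ∀ y ∈ a, n ≤ pvK y) :
    (∀ m, pvScanPrefs prefs (a.map PySem.Str.lower) a = some m → pvIsFirstMin a m) ∧
    (pvScanPrefs prefs (a.map PySem.Str.lower) a = none → ∀ y ∈ a, pvK y = 12) := by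
  induction prefs generalizing n with
  | nil =>
    refine ⟨fun m hm => by simp [pvScanPrefs] at hm, fun _ y hy => ?_⟩
    have h12 : pvP.length ≤ n := List.drop_eq_nil_iff.mp hsuf
    have : (12 : Nat) ≤ n := by
      have : pvP.length = 12 := by decide
      omega
    have := pvK_le y
    have := hlow y hy
    omega
  | cons fmt rest ih =>
    have hne : pvP.drop n ≠ [] := by rw [hsuf]; simp
    have hn : n < 12 := by
      have h12 : pvP.length = 12 := by decide
      rcases Nat.lt_or_ge n 12 with h | h
      · exact h
      · exact absurd (List.drop_eq_nil_iff.mpr (by omega)) hne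
    have hnl : n < pvP.length := by
      have : pvP.length = 12 := by decide
      omega
    have hfmtq : pvP[n]? = some fmt := by
      have h1 : (pvP.drop n)[0]? = pvP[n + 0]? := List.getElem?_drop
      rw [hsuf] at h1
      simpa using h1.symm
    have hfmt : pvP.getD n "" = fmt := by
      rw [List.getD_eq_getElem _ _ hnl]
      have := List.getElem?_eq_getElem hnl
      rw [hfmtq] at this
      exact (Option.some_injective _ this).symm
    have hfl : PySem.Str.lower fmt = fmt :=
      pvLower_mem_P fmt (by rw [← hfmt]; exact pvGetD_mem hnl)
    simp only [pvScanPrefs, hfl]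
    split_ifs with hmem
    · obtain ⟨i, hia, hbind, hieq, hjneq⟩ := pvScan_find a fmt hmem
      refine ⟨fun m hm => ?_, fun hm => ?_⟩
      · rw [hbind] at hm
        have hmv : a.getD i "" = m := by injection hm
        have hkm : pvK m = n := by
          unfold pvK
          rw [(pvRankOf_eq_iff _ n hn)]
          rw [← hmv, ← pvGetD_map_lower hia, hieq, hfmt]
        refine ⟨i, hia, hmv, fun j hj => ?_, fun j hj => ?_⟩
        · have h1 := hjneq j hj
          rw [pvGetD_map_lower (by omega)] at h1
          have h2 : pvK (a.getD j "") ≠ n := fun hc => h1 (by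
            have h4 := (pvRankOf_eq_iff (PySem.Str.lower (a.getD j "")) n hn).mp hc
            rw [hfmt] at h4
            exact h4)
          have h3 := hlow _ (pvGetD_mem (show j < a.length by omega))
          omega
        · have h3 := hlow _ (pvGetD_mem hj)
          omega
      · rw [hbind] at hm
        exact absurd hm (by simp)
    · refine ih (n + 1) ?_ ?_
      · rw [← List.tail_drop, hsuf]
        rfl
      · intro y hy
        have h1 := hlow y hy
        have h2 : pvK y ≠ n := by
          intro hc
          apply hmem
          have : PySem.Str.lower y = fmt := by
            have := (pvRankOf_eq_iff (PySem.Str.lower y) n hn).mp hc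
            rw [← hfmt]
            exact this
          rw [← this]
          exact List.mem_map_of_mem hy
        omega

lemma pvMin?_cons {κ : Type} [LT κ] [DecidableLT κ] (key : String → κ) (b : String) (t : List String) :
    PySem.List.min? (b :: t) key
      = some (t.foldl (fun m x => if key x < key m then x else m) b) := by
  induction t generalizing b with
  | nil => rfl
  | cons x t ih =>
    have h1 : PySem.List.min? (b :: x :: t) key
        = PySem.List.min? ((if key x < key b then x else b) :: t) key := by
      simp only [PySem.List.min?, List.foldl_cons]
      congr 1
      show (if key x < key b then some x else some b)
        = some (if key x < key b then x else b)
      split_ifs <;> rfl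
    rw [h1, ih]
    simp only [List.foldl_cons]

lemma pvFold_firstMin (t : List String) (b : String) :
    pvIsFirstMin (b :: t) (t.foldl (fun m x => if pvK x < pvK m then x else m) b) := by
  induction t generalizing b with
  | nil =>
    refine ⟨0, by simp, rfl, fun j hj => absurd hj (by omega), fun j hj => ?_⟩
    have hj0 : j = 0 := by simp at hj; omega
    subst hj0
    simp
  | cons x t ih =>
    simp only [List.foldl_cons]
    by_cases hbx : pvK x < pvK b
    · rw [if_pos hbx]
      obtain ⟨i, hi, heq, hfst, hall⟩ := ih x
      refine ⟨i + 1, by simp at hi ⊢; omega, by simpa using heq, ?_, ?_⟩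
      · intro j hj
        match j with
        | 0 =>
          have h1 := hall 0 (by simp)
          simp only [List.getD_cons_zero] at h1
          simp only [List.getD_cons_zero]
          omega
        | j' + 1 =>
          have := hfst j' (by omega)
          simpa using this
      · intro j hj
        match j with
        | 0 =>
          have h1 := hall 0 (by simp)
          simp only [List.getD_cons_zero] at h1
          simp only [List.getD_cons_zero]
          omega
        | j' + 1 =>
          have := hall j' (by simp at hj ⊢; omega)
          simpa using this
    · rw [if_neg hbx]
      obtain ⟨i, hi, heq, hfst, hall⟩ := ih b
      match i, hi with
      | 0, _ =>
        simp only [List.getD_cons_zero] at heq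
        refine ⟨0, by simp, by simpa using heq, fun j hj => absurd hj (by omega), ?_⟩
        intro j hj
        match j with
        | 0 =>
          simp only [List.getD_cons_zero]
          rw [← heq]
        | 1 =>
          simp only [List.getD_cons_succ, List.getD_cons_zero]
          rw [← heq]
          omega
        | j' + 2 =>
          have := hall (j' + 1) (by simp at hj ⊢; omega)
          simpa using this
      | i' + 1, hi =>
        have hib : pvK (t.foldl (fun m x => if pvK x < pvK m then x else m) b) < pvK b := by
          have h0 := hfst 0 (by omega)
          simpa using h0
        refine ⟨i' + 2, by simp at hi ⊢; omega, by simpa using heq, ?_, ?_⟩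
        · intro j hj
          match j with
          | 0 => simpa using hib
          | 1 =>
            simp only [List.getD_cons_succ, List.getD_cons_zero]
            omega
          | j' + 2 =>
            have := hfst (j' + 1) (by omega)
            simpa using this
        · intro j hj
          match j with
          | 0 =>
            simp only [List.getD_cons_zero]
            omega
          | 1 =>
            simp only [List.getD_cons_succ, List.getD_cons_zero]
            omega
          | j' + 2 =>
            have := hall (j' + 1) (by simp at hj ⊢; omega)
            simpa using this

lemma pvAlt_cons (b : String) (t : List String) :
    detect_best_output_format_py_alt (b :: t)
      = t.foldl (fun m x => if pvK x < pvK m then x else m) b := by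
  unfold detect_best_output_format_py_alt PySem.List.minD
  rw [pvMin?_cons]
  simp only [Option.getD_some]
  congr 1
  funext m x
  rw [pvRank_getD_eq, pvRank_getD_eq]
  simp [pvK, Nat.cast_lt]

-- ===== VERDICT (by name: the statement is the Claim_ definition above) =====
theorem detect_best_output_format_py_spec : Claim_equal_detect_best_output_format_py := by
  intro a _
  unfold Spec_detect_best_output_format_py
  cases a with
  | nil =>
    show detect_best_output_format_py [] = detect_best_output_format_py_alt []
    decide
  | cons b t =>
    show detect_best_output_format_py (b :: t) = detect_best_output_format_py_alt (b :: t)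
    have hA : detect_best_output_format_py (b :: t)
        = (match pvScanPrefs pvP ((b :: t).map PySem.Str.lower) (b :: t) with
           | some s => s
           | none => b) := by
      show (match pvScanPrefs pvGeojsonFormats ((b :: t).map PySem.Str.lower) (b :: t) with
            | some s => s
            | none =>
              match pvScanPrefs pvGmlFormats ((b :: t).map PySem.Str.lower) (b :: t) with
              | some s => s
              | none => b) = _
      rw [show (pvP : List String) = pvGeojsonFormats ++ pvGmlFormats from rfl, pvScan_append]
      cases pvScanPrefs pvGeojsonFormats ((b :: t).map PySem.Str.lower) (b :: t) <;>
        cases pvScanPrefs pvGmlFormats ((b :: t).map PySem.Str.lower) (b :: t) <;> rfl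
    have hspec := pvScan_spec pvP 0 (by simp) (b :: t) (fun y _ => by omega)
    have hB : pvIsFirstMin (b :: t) (detect_best_output_format_py_alt (b :: t)) := by
      rw [pvAlt_cons]
      exact pvFold_firstMin t b
    rw [hA]
    cases hscan : pvScanPrefs pvP ((b :: t).map PySem.Str.lower) (b :: t) with
    | none =>
      have hall := hspec.2 hscan
      have hAF : pvIsFirstMin (b :: t) b := by
        refine ⟨0, by simp, rfl, fun j hj => absurd hj (by omega), fun j hj => ?_⟩
        have h1 := hall b (by simp)
        have h2 := hall _ (pvGetD_mem hj)
        omega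
      exact pvFirstMin_unique hAF hB
    | some m =>
      exact pvFirstMin_unique (hspec.1 m hscan) hB
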